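-- pv_equiv track=rewrite | github.com/Tazkeer-Dua-Samak/Codingal-Course | M11/Homework Assignments 11/Project-4.py | is_power_of_8
-- ===== SOURCE A (Python) =====
-- def is_power_of_8(n):
--     if n <= 0:
--         return False
--
--     if (n & (n - 1)) != 0:
--         return False
--
--     shifts = 0
--
--     while n > 1:
--         n >>= 1
--         shifts += 1
--
--     return shifts % 3 == 0
-- ===== SOURCE B (Python) =====
-- def is_power_of_8(n):
--     if n <= 0:
--         return False
--     if n & (n - 1):
--         return False
--     while n % 8 == 0:
--         n //= 8
--     return n == 1
-- ===== Notes on version B (the rewrite author's own statement) =====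
-- stated objective: simpler
-- what changed: Replaces the shift-counting loop plus 'shifts % 3 == 0' test with a loop that repeatedly divides by 8 and checks the remainder collapses to 1.
import Mathlib
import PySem

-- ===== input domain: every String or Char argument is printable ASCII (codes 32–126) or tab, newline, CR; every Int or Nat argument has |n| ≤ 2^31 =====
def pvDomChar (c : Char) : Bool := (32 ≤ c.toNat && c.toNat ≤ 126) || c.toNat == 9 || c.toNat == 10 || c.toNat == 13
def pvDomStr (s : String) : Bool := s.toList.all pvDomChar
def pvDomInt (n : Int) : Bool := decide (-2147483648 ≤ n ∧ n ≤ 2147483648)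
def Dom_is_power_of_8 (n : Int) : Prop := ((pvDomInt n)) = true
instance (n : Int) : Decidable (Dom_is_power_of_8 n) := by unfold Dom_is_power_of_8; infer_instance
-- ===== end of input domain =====

-- B replaces the shift-counting loop plus 'shifts % 3 == 0' by repeatedly dividing by 8 and checking the result is 1 (simpler).

-- ===== PORT A =====
-- the 'while n > 1: n >>= 1; shifts += 1' loop of A
def pvShiftLoop (n : Int) (shifts : Int) : Int :=
  if h : 1 < n then pvShiftLoop (n >>> (1 : Nat)) (shifts + 1) else shifts
termination_by n.toNat
decreasing_by
  cases n with
  | ofNat m =>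
      have hm : 2 ≤ m := by
        have h2 : (1 : Int) < (m : Int) := h
        exact_mod_cast h2
      show (Int.ofNat (m >>> 1)).toNat < (Int.ofNat m).toNat
      rw [Nat.shiftRight_one]
      exact Nat.div_lt_self (by omega) (by omega)
  | negSucc m => exact absurd h (by exact of_decide_eq_false rfl)

def is_power_of_8 (n : Int) : Bool :=
  if n ≤ 0 then false
  else if PySem.Int.band n (n - 1) ≠ 0 then false
  else PySem.Int.mod (pvShiftLoop n 0) 3 == 0

-- ===== PORT B =====
-- the 'while n % 8 == 0: n //= 8' loop of B ('0 < n' is only a totality guard: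
-- the helper is reached only after the 'n <= 0' branch of B, where division by 8 keeps n positive)
def pvStrip8 (n : Int) : Int :=
  if h : 0 < n ∧ PySem.Int.mod n 8 = 0 then pvStrip8 (PySem.Int.floordiv n 8) else n
termination_by n.toNat
decreasing_by
  obtain ⟨h1, h2⟩ := h
  obtain ⟨c, hc⟩ := (PySem.Int.mod_eq_zero_iff_dvd n 8).mp h2
  rw [PySem.Int.floordiv_eq_ediv_of_pos (by omega), hc, Int.mul_ediv_cancel_left c (by omega)]
  omega

def is_power_of_8_alt (n : Int) : Bool :=
  if n ≤ 0 then false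
  else if PySem.Int.band n (n - 1) ≠ 0 then false
  else pvStrip8 n == 1

-- ===== PRECONDITION & SPEC =====
def Spec_is_power_of_8 (n : Int) (out : Bool) : Prop := out = is_power_of_8_alt n
instance (n : Int) (out : Bool) : Decidable (Spec_is_power_of_8 n out) := by unfold Spec_is_power_of_8; infer_instance

-- ===== CLAIM (what is proved, stated in full; the proofs are below) =====
def Claim_equal_is_power_of_8 : Prop := ∀ (n : Int), Dom_is_power_of_8 n → Spec_is_power_of_8 n (is_power_of_8 n)

-- ===== LEMMAS AND PROOFS =====

-- a positive Nat whose 'm &&& (m-1)' vanishes is a power of two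
theorem pvPow2_of_land (m : Nat) (hm : 0 < m) (h : m &&& (m - 1) = 0) : ∃ k, m = 2 ^ k := by
  induction m using Nat.strong_induction_on with
  | _ m ih =>
    rcases Nat.lt_or_ge m 2 with h2 | h2
    · exact ⟨0, by omega⟩
    · rcases Nat.even_or_odd m with he | ho
      · -- m = 2*t, m-1 = 2*(t-1)+1, so m &&& (m-1) = 2*(t &&& (t-1))
        obtain ⟨t, ht⟩ := he
        have ht' : m = 2 * t := by omega
        have htpos : 0 < t := by omega
        have hb : m &&& (m - 1) = 2 * (t &&& (t - 1)) := by
          have e2 : m - 1 = Nat.bit true (t - 1) := by simp [Nat.bit]; omega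
          have e1 : m = Nat.bit false t := by simp [Nat.bit]; omega
          rw [e2, e1, Nat.land_bit]
          simp [Nat.bit]
        obtain ⟨k, hk⟩ := ih t (by omega) htpos (by omega)
        exact ⟨k + 1, by rw [ht', hk]; ring⟩
      · -- m odd, m ≥ 3: m &&& (m-1) = 2*(m/2) ≠ 0, contradiction
        exfalso
        obtain ⟨t, ht⟩ := ho
        have htpos : 0 < t := by omega
        have hb : m &&& (m - 1) = 2 * t := by
          have e2 : m - 1 = Nat.bit false t := by simp [Nat.bit]; omega
          have e1 : m = Nat.bit true t := by simp [Nat.bit]; omega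
          rw [e2, e1, Nat.land_bit]
          simp [Nat.bit]
        omega

-- A's loop on 2^k counts exactly k shifts
theorem pvShiftLoop_pow (k : Nat) : ∀ s : Int, pvShiftLoop ((2 : Int) ^ k) s = s + k := by
  induction k with
  | zero => intro s; rw [pvShiftLoop]; norm_num
  | succ k ih =>
      intro s
      rw [pvShiftLoop]
      have h0 : (1 : Int) ≤ 2 ^ k := one_le_pow₀ (by norm_num)
      have hgt : (1 : Int) < 2 ^ (k + 1) := by rw [pow_succ]; nlinarith
      rw [dif_pos hgt]
      have hsh : ((2 : Int) ^ (k + 1)) >>> (1 : Nat) = (2 : Int) ^ k := by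
        have hcast : ((2 : Int) ^ (k + 1)) = (((2 ^ (k + 1) : Nat)) : Int) := by push_cast; ring
        rw [hcast]
        show ((((2 ^ (k + 1) : Nat)) >>> 1 : Nat) : Int) = (2 : Int) ^ k
        rw [Nat.shiftRight_one, pow_succ, Nat.mul_div_cancel _ (by norm_num)]
        push_cast; ring
      rw [hsh, ih]
      push_cast; ring

-- B's loop on 2^k strips threes of twos, leaving 2^(k % 3)
theorem pvStrip8_pow (k : Nat) : pvStrip8 ((2 : Int) ^ k) = (2 : Int) ^ (k % 3) := by
  induction k using Nat.strong_induction_on with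
  | _ k ih =>
    rcases Nat.lt_or_ge k 3 with hk | hk
    · rw [pvStrip8]
      have hmod : PySem.Int.mod ((2 : Int) ^ k) 8 ≠ 0 := by
        rw [PySem.Int.mod_eq_emod_of_pos (by norm_num)]
        interval_cases k <;> decide
      rw [dif_neg (by tauto)]
      rw [Nat.mod_eq_of_lt hk]
    · rw [pvStrip8]
      have hpos : (0 : Int) < 2 ^ k := by positivity
      have hsplit : (2 : Int) ^ k = 2 ^ (k - 3) * 8 := by
        have : k = (k - 3) + 3 := by omega
        rw [this, pow_add]; norm_num
      have hmod : PySem.Int.mod ((2 : Int) ^ k) 8 = 0 := by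
        rw [(PySem.Int.mod_eq_zero_iff_dvd _ 8)]
        exact ⟨2 ^ (k - 3), by rw [hsplit]; ring⟩
      have hdiv : PySem.Int.floordiv ((2 : Int) ^ k) 8 = 2 ^ (k - 3) := by
        rw [PySem.Int.floordiv_eq_ediv_of_pos (by norm_num), hsplit,
          Int.mul_ediv_cancel _ (by norm_num)]
      rw [dif_pos ⟨hpos, hmod⟩, hdiv, ih (k - 3) (by omega)]
      congr 1
      omega

-- ===== VERDICT (by name: the statement is the Claim_ definition above) =====
theorem is_power_of_8_spec : Claim_equal_is_power_of_8 := by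
  intro n _
  unfold Spec_is_power_of_8 is_power_of_8 is_power_of_8_alt
  by_cases hle : n ≤ 0
  · simp [hle]
  · simp only [hle, if_false]
    by_cases hband : PySem.Int.band n (n - 1) ≠ 0
    · simp [hband]
    · simp only [hband, if_false]
      simp only [ne_eq, not_not] at hband
      have hpos : 0 < n := by omega
      have hb' : (n.toNat &&& (n.toNat - 1) : Nat) = 0 := by
        have := PySem.Int.band_of_nonneg (a := n) (b := n - 1) (by omega) (by omega)
        have h1 : (n - 1).toNat = n.toNat - 1 := by omega
        rw [h1] at this
        omega
      obtain ⟨k, hk⟩ := pvPow2_of_land n.toNat (by omega) hb'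
      have hn : n = ((2 : Int)) ^ k := by
        have h1 : ((n.toNat : Int)) = (((2 ^ k : Nat)) : Int) := congrArg Nat.cast hk
        rw [Int.toNat_of_nonneg (by omega)] at h1
        rw [h1]; push_cast; ring
      subst hn
      rw [pvShiftLoop_pow, pvStrip8_pow]
      have hr : k % 3 < 3 := Nat.mod_lt _ (by norm_num)
      have hmodk : PySem.Int.mod (0 + (k : Int)) 3 = ((k % 3 : Nat) : Int) := by
        rw [PySem.Int.mod_eq_emod_of_pos (by norm_num)]
        push_cast
        omega
      rw [hmodk]
      interval_cases h : k % 3 <;> simp
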